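-- pv_equiv track=rewrite | github.com/BSadioDiallo/Alfy-BootCamp | time_complexity/time_complexity.py | func
-- ===== SOURCE A (Python) =====
-- def func(n) :
--     """
--     time complexity : n^n
--     description : firt loop iterate n/2 times and in each iteration the while loop
--     iterate n/2 times so
--     """
--     k = 0
--     for i in range(n//2, n):
--         j = 1
--         while j <= n:
--             k += 1
--             j *= 2
--     return k
-- ===== SOURCE B (Python) =====
-- def func(n):
--     # Closed form: each of the (n - n//2) outer iterations adds bit_length(n) doublings.
--     if n <= 0:
--         return 0
--     return (n - n // 2) * n.bit_length()
-- ===== Notes on version B (the rewrite author's own statement) =====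
-- stated objective: faster
-- what changed: Replaced the nested loop (outer half-range loop, inner doubling while-loop) by the closed form (n - n//2) * n.bit_length() for positive n.
import Mathlib
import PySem

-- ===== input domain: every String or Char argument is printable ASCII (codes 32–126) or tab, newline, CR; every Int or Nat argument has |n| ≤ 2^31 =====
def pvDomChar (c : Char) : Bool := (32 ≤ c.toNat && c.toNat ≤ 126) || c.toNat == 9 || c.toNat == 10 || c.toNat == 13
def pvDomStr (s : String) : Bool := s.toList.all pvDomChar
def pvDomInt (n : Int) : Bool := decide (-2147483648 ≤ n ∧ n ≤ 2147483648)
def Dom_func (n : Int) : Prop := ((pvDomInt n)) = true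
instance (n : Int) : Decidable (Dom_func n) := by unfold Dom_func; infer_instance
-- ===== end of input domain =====

-- B replaces A's nested counting loops by the closed form (n - n//2) * bit_length(n); objective: faster.

-- ===== PORT A =====
-- inner 'while j <= n: k += 1; j *= 2' loop; hj carries the loop invariant 0 < j needed for termination
def funcWhile (n j k : Int) (hj : 0 < j) : Int :=
  if _h : j ≤ n then funcWhile n (j * 2) (k + 1) (by omega) else k
termination_by (n + 1 - j).toNat
decreasing_by omega

def func (n : Int) : Int :=
  (PySem.List.pyRange (PySem.Int.floordiv n 2) n 1).foldl
    (fun k _ => funcWhile n 1 k (by omega)) 0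

-- ===== PORT B =====
def func_alt (n : Int) : Int :=
  if n ≤ 0 then 0 else (n - PySem.Int.floordiv n 2) * (PySem.Int.bitLength n : Int)

-- ===== PRECONDITION & SPEC =====
def Spec_func (n : Int) (out : Int) : Prop := out = func_alt n
instance (n : Int) (out : Int) : Decidable (Spec_func n out) := by unfold Spec_func; infer_instance

-- ===== CLAIM (what is proved, stated in full; the proofs are below) =====
def Claim_equal_func : Prop := ∀ (n : Int), Dom_func n → Spec_func n (func n)

-- ===== LEMMAS AND PROOFS =====

theorem floordiv_floordiv_two (n j : Int) (hj : 0 < j) :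
    PySem.Int.floordiv (PySem.Int.floordiv n j) 2 = PySem.Int.floordiv n (j * 2) := by
  have hp : (0:Int) < j * 2 := by positivity
  obtain ⟨hlo, hhi⟩ := (PySem.Int.floordiv_eq_iff_of_pos (a := n) (b := j * 2) hp).mp rfl
  rw [PySem.Int.floordiv_eq_iff_of_pos (by omega : (0:Int) < 2)]
  refine ⟨?_, ?_⟩
  · rw [PySem.Int.le_floordiv_iff_mul_le hj]; nlinarith
  · rw [PySem.Int.floordiv_lt_iff_lt_mul hj]; nlinarith

theorem funcWhile_eq (n : Int) : ∀ (m : Nat) (j k : Int) (hj : 0 < j), (n + 1 - j).toNat = m → j ≤ n →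
    funcWhile n j k hj = k + (PySem.Int.bitLength (PySem.Int.floordiv n j) : Int) := by
  intro m
  induction m using Nat.strong_induction_on with
  | _ m ih =>
    intro j k hj hm hjn
    have h1 : 0 < PySem.Int.floordiv n j :=
      (PySem.Int.le_floordiv_iff_mul_le (q := 1) hj).mpr (by omega)
    rw [funcWhile, dif_pos hjn]
    by_cases h2 : j * 2 ≤ n
    · rw [ih _ (by omega) (j * 2) (k + 1) (by omega) rfl h2]
      rw [PySem.Int.bitLength_of_pos h1, floordiv_floordiv_two n j hj]
      push_cast
      ring
    · rw [funcWhile, dif_neg h2]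
      have : PySem.Int.floordiv n j = 1 := by
        rw [PySem.Int.floordiv_eq_iff_of_pos hj]; omega
      rw [this]
      have hb : PySem.Int.bitLength 1 = 1 := by decide
      rw [hb]
      push_cast
      ring

theorem foldl_const_add (C : Int) : ∀ (l : List Int) (s : Int),
    l.foldl (fun k _ => k + C) s = s + (l.length : Int) * C := by
  intro l
  induction l with
  | nil => intro s; simp
  | cons x xs ih => intro s; simp [List.foldl, ih]; ring

-- ===== VERDICT (by name: the statement is the Claim_ definition above) =====
theorem func_spec : Claim_equal_func := by
  intro n _
  unfold Spec_func func func_alt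
  by_cases hn : n ≤ 0
  · rw [PySem.List.pyRange_one_eq_nil ((PySem.Int.le_floordiv_iff_mul_le (a := n) (q := n) (by omega : (0:Int) < 2)).mpr (by omega))]
    simp [hn]
  · push_neg at hn
    have hd1 : PySem.Int.floordiv n 1 = n := by
      rw [PySem.Int.floordiv_eq_iff_of_pos (by omega : (0:Int) < 1)]; omega
    have h1n : (1:Int) ≤ n := by omega
    have hfe : (fun (k : Int) (_ : Int) => funcWhile n 1 k (by omega)) =
        (fun (k : Int) (_ : Int) => k + (PySem.Int.bitLength n : Int)) := by
      funext k i
      rw [funcWhile_eq n ((n + 1 - 1).toNat) 1 k one_pos rfl h1n, hd1]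
    rw [hfe, foldl_const_add, PySem.List.length_pyRange_one]
    have hle : PySem.Int.floordiv n 2 ≤ n := by
      have := (PySem.Int.floordiv_lt_iff_lt_mul (a := n) (q := n + 1) (by omega : (0:Int) < 2)).mpr (by omega)
      omega
    rw [if_neg (show ¬ n ≤ 0 by omega)]
    have : ((n - PySem.Int.floordiv n 2).toNat : Int) = n - PySem.Int.floordiv n 2 := by omega
    rw [this]
    ring
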